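-- pv_equiv track=rewrite | github.com/martinbednar/jsrestrictor | tests/integration_tests/math_operations.py | is_in_accuracy
-- ===== SOURCE A (Python) =====
-- def is_in_accuracy(number, accuracy):
--     number_str = str(int(number))[::-1]
--     accuracy_str = str(int(accuracy))[::-1]
--     index = 0
--     while accuracy_str[index] == '0':
--         if index < len(number_str):
--             if number_str[index] != '0':
--                 return False
--         index += 1
--     return True
-- ===== SOURCE B (Python) =====
-- def is_in_accuracy(number, accuracy):
--     s = str(int(accuracy))
--     k = 0
--     while s[-1 - k] == '0':
--         k += 1
--     return int(number) % (10 ** k) == 0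
-- ===== Notes on version B (the rewrite author's own statement) =====
-- stated objective: simpler
-- what changed: B counts the trailing zeros k of str(accuracy) once and replaces A's char-by-char comparison of the reversed number string by a single arithmetic divisibility test int(number) % 10**k == 0.
-- outside the precondition, e.g. on is_in_accuracy(686, 0): A returns False, B raises IndexError
import Mathlib
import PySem

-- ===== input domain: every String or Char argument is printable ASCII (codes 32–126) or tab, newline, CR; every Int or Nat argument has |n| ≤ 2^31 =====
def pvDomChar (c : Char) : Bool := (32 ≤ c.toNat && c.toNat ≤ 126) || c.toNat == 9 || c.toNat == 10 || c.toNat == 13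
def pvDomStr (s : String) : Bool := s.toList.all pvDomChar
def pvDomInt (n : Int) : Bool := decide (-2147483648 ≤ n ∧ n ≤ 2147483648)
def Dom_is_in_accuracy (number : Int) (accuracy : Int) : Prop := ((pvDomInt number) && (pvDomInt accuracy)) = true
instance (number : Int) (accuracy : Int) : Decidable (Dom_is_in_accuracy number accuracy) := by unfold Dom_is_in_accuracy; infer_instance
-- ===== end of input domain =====

-- B replaces A's digit-by-digit reversed-string comparison of the number by a single
-- modular divisibility test against 10^(trailing zeros of accuracy) — objective: simpler.

-- ===== PORT A =====
-- A's while loop: walks the reversed accuracy string (passed as its remaining suffix,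
-- in lockstep with `index`) while its chars are '0', checking the reversed number
-- string char by char.  The [] case is Python's IndexError (outside Pre_).
def pvLoopA (numRev : List Char) : List Char → Nat → Bool
  | [], _ => false
  | c :: rest, index =>
      if c = '0' then
        if index < numRev.length then
          if numRev.getD index '0' ≠ '0' then false
          else pvLoopA numRev rest (index + 1)
        else pvLoopA numRev rest (index + 1)
      else true

-- str(int(x))[::-1] ported as (toChars x).reverse (PySem.Str.slice?_none_none_neg_one: [::-1] is reverse)
def is_in_accuracy (number : Int) (accuracy : Int) : Bool :=
  let number_str := (PySem.Int.toChars number).reverse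
  let accuracy_str := (PySem.Int.toChars accuracy).reverse
  pvLoopA number_str accuracy_str 0

-- ===== PORT B =====
-- B's while loop `while s[-1-k] == '0': k += 1` reads s from the right, i.e. it is
-- structural recursion on s.reverse; the [] case is Python's IndexError (outside Pre_).
def pvTrailZeros : List Char → Nat
  | [] => 0
  | c :: rest => if c = '0' then pvTrailZeros rest + 1 else 0

def is_in_accuracy_alt (number : Int) (accuracy : Int) : Bool :=
  let s := PySem.Int.toChars accuracy
  let k := pvTrailZeros s.reverse
  PySem.Int.mod number (10 ^ k) == 0

-- ===== PRECONDITION & SPEC =====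
-- Pre_ excludes accuracy = 0, where A's loop runs off the end of "0": A raises
-- IndexError unless the number's last digit is nonzero (then an accidental False
-- from the leftover first iteration), while B's count loop always raises IndexError.
def Pre_is_in_accuracy (number : Int) (accuracy : Int) : Prop := accuracy ≠ 0
instance (number : Int) (accuracy : Int) : Decidable (Pre_is_in_accuracy number accuracy) := by unfold Pre_is_in_accuracy; infer_instance
def pvWitness_is_in_accuracy : Int × Int := (1500, 100)

def Spec_is_in_accuracy (number : Int) (accuracy : Int) (out : Bool) : Prop := out = is_in_accuracy_alt number accuracy
instance (number : Int) (accuracy : Int) (out : Bool) : Decidable (Spec_is_in_accuracy number accuracy out) := by unfold Spec_is_in_accuracy; infer_instance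

-- ===== CLAIM (what is proved, stated in full; the proofs are below) =====
def Claim_equal_is_in_accuracy : Prop := ∀ (number : Int) (accuracy : Int), Dom_is_in_accuracy number accuracy → Pre_is_in_accuracy number accuracy → Spec_is_in_accuracy number accuracy (is_in_accuracy number accuracy)

-- ===== LEMMAS AND PROOFS =====

-- core's Nat.toDigits is Nat.digits reversed and rendered, for positive m
theorem pvToDigitsCore_eq (fuel : Nat) : ∀ (m : Nat), 0 < m → m ≤ fuel → ∀ (acc : List Char),
    Nat.toDigitsCore 10 fuel m acc = ((Nat.digits 10 m).map Nat.digitChar).reverse ++ acc := by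
  induction fuel with
  | zero => intro m hm hf; omega
  | succ fuel ih =>
    intro m hm hf acc
    rw [Nat.toDigitsCore]
    rw [Nat.digits_def' (by norm_num : (1:Nat) < 10) hm]
    by_cases h10 : m / 10 = 0
    · simp [h10]
    · simp only [h10, if_false]
      rw [ih (m / 10) (Nat.pos_of_ne_zero h10) (by omega)]
      simp

theorem pvToDigits_eq (m : Nat) (hm : 0 < m) :
    Nat.toDigits 10 m = ((Nat.digits 10 m).map Nat.digitChar).reverse := by
  rw [Nat.toDigits, pvToDigitsCore_eq (m+1) m hm (by omega), List.append_nil]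

-- a decimal digit renders to '0' exactly when it is 0
theorem pvDigitChar_eq_zero_iff (d : Nat) (hd : d < 10) : Nat.digitChar d = '0' ↔ d = 0 := by
  interval_cases d <;> decide

-- the prefix of the little-endian digit list is all-zero iff 10^k divides m
theorem pvDigits_take_zero_iff (m k : Nat) :
    (((Nat.digits 10 m).take k).all (fun d => d = 0)) = true ↔ 10 ^ k ∣ m := by
  induction k generalizing m with
  | zero => simp
  | succ k ih =>
    rcases Nat.eq_zero_or_pos m with rfl | hm
    · simp
    · rw [Nat.digits_def' (by norm_num : (1:Nat) < 10) hm]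
      simp only [List.take_succ_cons, List.all_cons, Bool.and_eq_true, decide_eq_true_eq]
      rw [ih]
      constructor
      · rintro ⟨h0, hd⟩
        have h10 : (10:Nat) ∣ m := by omega
        rw [Nat.dvd_div_iff_mul_dvd h10] at hd
        rw [pow_succ]
        exact (mul_comm (10:Nat) (10^k)) ▸ hd
      · intro hd
        have h10 : (10:Nat) ∣ m := dvd_trans (dvd_pow_self 10 (Nat.succ_ne_zero k)) hd
        refine ⟨by omega, ?_⟩
        rw [Nat.dvd_div_iff_mul_dvd h10, mul_comm, ← pow_succ]
        exact hd

-- all-'0' over the rendered digit prefix equals all-0 over the digit prefix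
theorem pvMapPrefix (m k : Nat) :
    ((((Nat.digits 10 m).map Nat.digitChar).take k).all (fun c => c = '0')) = true ↔ 10 ^ k ∣ m := by
  rw [← List.map_take, ← pvDigits_take_zero_iff m k]
  simp only [List.all_map, List.all_eq_true, Function.comp_apply, decide_eq_true_eq]
  constructor
  · intro h d hd
    exact (pvDigitChar_eq_zero_iff d (Nat.digits_lt_base (by norm_num) (List.mem_of_mem_take hd))).mp (h d hd)
  · intro h d hd
    exact (pvDigitChar_eq_zero_iff d (Nat.digits_lt_base (by norm_num) (List.mem_of_mem_take hd))).mpr (h d hd)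

theorem pvNatDvd (n : Int) (k : Nat) : (10 : Int) ^ k ∣ n ↔ 10 ^ k ∣ n.natAbs := by
  rw [← Int.natAbs_dvd_natAbs]
  norm_num [Int.natAbs_pow]

-- the first k chars of str(n) reversed are all '0' iff 10^k ∣ n
theorem pvRevTake_iff (n : Int) (k : Nat) :
    ((((PySem.Int.toChars n).reverse.take k).all (fun c => c = '0')) = true) ↔ (10 : Int) ^ k ∣ n := by
  rw [PySem.Int.toChars, pvNatDvd]
  by_cases hn : n < 0
  · simp only [hn, if_true]
    have hm : 0 < n.natAbs := by omega
    rw [pvToDigits_eq _ hm]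
    simp only [List.reverse_cons, List.reverse_reverse]
    set A := (Nat.digits 10 n.natAbs).map Nat.digitChar with hA
    have hAlen : A.length = (Nat.digits 10 n.natAbs).length := List.length_map ..
    by_cases hk : k ≤ A.length
    · rw [List.take_append_of_le_length hk]
      exact pvMapPrefix n.natAbs k
    · rw [List.take_append]
      constructor
      · intro h
        exfalso
        have : ('-' : Char) = '0' := by
          have := List.all_eq_true.mp h '-' (by
            simp only [List.mem_append]
            right
            have : 1 ≤ k - A.length := by omega
            simp [List.take_of_length_le (by simp; omega : ([('-' : Char)]).length ≤ k - A.length)])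
          simpa using this
        exact absurd this (by decide)
      · intro h
        exfalso
        have hlt : n.natAbs < 10 ^ (Nat.digits 10 n.natAbs).length :=
          Nat.lt_base_pow_length_digits (by norm_num)
        have hle : 10 ^ k ≤ n.natAbs := Nat.le_of_dvd hm h
        have : (10:Nat) ^ (Nat.digits 10 n.natAbs).length ≤ 10 ^ k :=
          Nat.pow_le_pow_right (by norm_num) (by omega)
        omega
  · simp only [hn, if_false]
    rcases Nat.eq_zero_or_pos n.toNat with h0 | hpos
    · have hn0 : n = 0 := by omega
      subst hn0
      constructor
      · intro _; exact Dvd.intro 0 rfl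
      · intro _
        have : Nat.toDigits 10 (Int.toNat 0) = ['0'] := by decide
        rw [this]
        cases k <;> simp
    · have habs : n.natAbs = n.toNat := by omega
      rw [pvToDigits_eq _ hpos, List.reverse_reverse, habs]
      exact pvMapPrefix n.toNat k

-- A's loop, when the driving list contains a non-'0' char, checks exactly the
-- first (pvTrailZeros l) positions of numRev from `index` on
theorem pvLoopA_eq (numRev : List Char) (l : List Char) (index : Nat)
    (h : ∃ c ∈ l, c ≠ '0') :
    pvLoopA numRev l index
      = ((numRev.drop index).take (pvTrailZeros l)).all (fun c => c = '0') := by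
  induction l generalizing index with
  | nil => simp at h
  | cons c rest ih =>
    by_cases hc : c = '0'
    · subst hc
      have hrest : ∃ c ∈ rest, c ≠ '0' := by
        rcases h with ⟨d, hd, hdne⟩
        rcases List.mem_cons.mp hd with rfl | hmem
        · exact absurd rfl hdne
        · exact ⟨d, hmem, hdne⟩
      rw [pvLoopA, pvTrailZeros]
      simp only [reduceIte]
      by_cases hidx : index < numRev.length
      · rw [if_pos hidx]
        rw [List.drop_eq_getElem_cons hidx, List.take_succ_cons, List.all_cons]
        rw [List.getD_eq_getElem numRev '0' hidx]
        by_cases hne : numRev[index] = '0'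
        · simp only [hne]
          rw [if_neg (by decide : ¬('0':Char) ≠ '0'), ih (index + 1) hrest]
          simp
        · rw [if_pos hne]
          simp [hne]
      · rw [if_neg hidx]
        rw [List.drop_of_length_le (by omega), List.take_nil, List.all_nil]
        rw [ih (index + 1) hrest, List.drop_of_length_le (by omega)]
        simp
    · rw [pvLoopA, pvTrailZeros]
      simp [hc]

-- str(accuracy) for accuracy ≠ 0 contains a char that is not '0'
theorem pvToChars_ne_zero (a : Int) (ha : a ≠ 0) :
    ∃ c ∈ (PySem.Int.toChars a).reverse, c ≠ '0' := by
  rw [PySem.Int.toChars]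
  by_cases hn : a < 0
  · exact ⟨'-', by simp [hn], by decide⟩
  · have hpos : 0 < a.toNat := by omega
    simp only [hn, if_false, List.mem_reverse]
    have hne : Nat.digits 10 a.toNat ≠ [] := Nat.digits_ne_nil_iff_ne_zero.mpr (by omega)
    have hlast := Nat.getLast_digit_ne_zero 10 (m := a.toNat) (by omega)
    refine ⟨Nat.digitChar ((Nat.digits 10 a.toNat).getLast hne), ?_, ?_⟩
    · rw [pvToDigits_eq _ hpos, List.mem_reverse]
      exact List.mem_map_of_mem (List.getLast_mem hne)
    · intro hc
      exact hlast ((pvDigitChar_eq_zero_iff _ (Nat.digits_lt_base (by norm_num) (List.getLast_mem hne))).mp hc)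

-- ===== VERDICT (by name: the statement is the Claim_ definition above) =====
theorem is_in_accuracy_spec : Claim_equal_is_in_accuracy := by
  intro number accuracy _ hpre
  unfold Spec_is_in_accuracy is_in_accuracy is_in_accuracy_alt
  rw [pvLoopA_eq _ _ _ (pvToChars_ne_zero accuracy hpre)]
  simp only [List.drop_zero]
  rw [Bool.eq_iff_iff, pvRevTake_iff number (pvTrailZeros (PySem.Int.toChars accuracy).reverse),
    beq_iff_eq, PySem.Int.mod_eq_zero_iff_dvd]
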